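-- pv_equiv track=rewrite | github.com/shuhaozhang95/leetcode_repo | others/others_py/code/xx1_replaceByRules.py | func
-- ===== SOURCE A (Python) =====
-- def func(strs,dicts):
--     res = []
--     ls = list(strs)
--     res.append("")
--     count = 0
--     for s in ls:
--         if s in dicts:
--             count += 1
--             tmp = []
--             for c in dicts[s]:
--                  tmp+= list(map(lambda x:x+c,res))
--             res = tmp
--         else:
--             res = list(map(lambda x:x+s,res))
--     if count==0:
--         return None
--     return res
-- ===== SOURCE B (Python) =====
-- def func(strs, dicts):
--     # Right-to-left recursion over the string: expand(i) builds all expansions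
--     # of the suffix strs[i:]; prepending each option keeps the earliest
--     # character varying fastest, matching A's order. No rebuilt result table.
--     if not any(s in dicts for s in strs):
--         return None
--
--     def expand(i):
--         if i == len(strs):
--             return [""]
--         tails = expand(i + 1)
--         opts = dicts[strs[i]] if strs[i] in dicts else strs[i]
--         return [o + t for t in tails for o in opts]
--
--     return expand(0)
-- ===== Notes on version B (the rewrite author's own statement) =====
-- stated objective: alternative
-- what changed: B replaces A's left-to-right rebuilding of the whole result list at every character with a single membership pre-test (any) followed by a right-to-left recursion over the string that expands suffixes; when no character is a key it returns None without building anything.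
import Mathlib
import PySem

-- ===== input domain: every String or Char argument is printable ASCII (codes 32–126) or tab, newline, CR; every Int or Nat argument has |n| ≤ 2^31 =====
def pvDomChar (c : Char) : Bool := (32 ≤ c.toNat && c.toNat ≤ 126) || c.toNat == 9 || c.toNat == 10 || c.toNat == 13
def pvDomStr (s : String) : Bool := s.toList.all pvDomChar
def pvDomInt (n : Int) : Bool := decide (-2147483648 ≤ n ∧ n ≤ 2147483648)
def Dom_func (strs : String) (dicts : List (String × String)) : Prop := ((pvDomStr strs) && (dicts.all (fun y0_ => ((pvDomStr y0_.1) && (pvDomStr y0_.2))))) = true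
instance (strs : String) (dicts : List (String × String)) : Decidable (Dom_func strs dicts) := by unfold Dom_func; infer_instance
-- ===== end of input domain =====

-- B replaces A's left-to-right rebuilding of the whole result list at every
-- character with one membership test (any) and a right-to-left recursion over
-- the string that expands suffixes (objective: alternative decomposition).

-- shared dict-lookup primitive: Python 's in dicts' / 'dicts[s]' on the assoc list
def lookupOf (dicts : List (String × String)) (s : Char) : Option String :=
  PySem.Dict.get? (PySem.Dict.mk dicts) (String.ofList [s])

-- ===== PORT A =====
-- strings are handled as List Char internally (Lean's String.append is opaque
-- to the kernel); the wrapper converts back at the end.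
def funcStep (dicts : List (String × String)) (st : List (List Char) × Int) (s : Char) :
    List (List Char) × Int :=
  match lookupOf dicts s with
  | some v =>
      -- count += 1; tmp = []; for c in dicts[s]: tmp += map(lambda x: x+c, res)
      (v.toList.foldl (fun tmp c => tmp ++ st.1.map (fun x => x ++ [c])) [], st.2 + 1)
  | none => (st.1.map (fun x => x ++ [s]), st.2)

def func (strs : String) (dicts : List (String × String)) : Option (List String) :=
  let r := strs.toList.foldl (funcStep dicts) ([[]], 0)
  if r.2 = 0 then none else some (r.1.map (fun cs => String.ofList cs))

-- ===== PORT B =====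
-- expand(i): all expansions of the suffix, [o + t for t in tails for o in opts]
def altExpand (dicts : List (String × String)) : List Char → List (List Char)
  | [] => [[]]
  | s :: rest =>
      let tails := altExpand dicts rest
      match lookupOf dicts s with
      | some v => tails.flatMap (fun t => v.toList.map (fun c => c :: t))
      | none => tails.map (fun t => s :: t)

def func_alt (strs : String) (dicts : List (String × String)) : Option (List String) :=
  if strs.toList.any (fun s => (lookupOf dicts s).isSome) then
    some ((altExpand dicts strs.toList).map (fun cs => String.ofList cs))
  else
    none

-- ===== PRECONDITION & SPEC =====
def Spec_func (strs : String) (dicts : List (String × String)) (out : Option (List String)) : Prop := out = func_alt strs dicts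
instance (strs : String) (dicts : List (String × String)) (out : Option (List String)) : Decidable (Spec_func strs dicts out) := by unfold Spec_func; infer_instance

-- ===== CLAIM (what is proved, stated in full; the proofs are below) =====
def Claim_equal_func : Prop := ∀ (strs : String) (dicts : List (String × String)), Dom_func strs dicts → Spec_func strs dicts (func strs dicts)

-- ===== LEMMAS AND PROOFS =====

-- the option list contributed by one character
def choiceOf (dicts : List (String × String)) (s : Char) : List (List Char) :=
  match lookupOf dicts s with
  | some v => v.toList.map (fun c => [c])
  | none => [[s]]

-- number of characters found in the dict
def countOf (dicts : List (String × String)) (ls : List Char) : Int :=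
  (ls.countP (fun s => (lookupOf dicts s).isSome) : Nat)

theorem countOf_cons (dicts : List (String × String)) (s : Char) (ls : List Char) :
    countOf dicts (s :: ls) =
      countOf dicts ls + (if (lookupOf dicts s).isSome then 1 else 0) := by
  simp [countOf, List.countP_cons]

-- A's one step on the result list, written uniformly through choiceOf
theorem funcStep_eq (dicts : List (String × String)) (res : List (List Char)) (count : Int)
    (s : Char) :
    funcStep dicts (res, count) s =
      ((choiceOf dicts s).flatMap (fun o => res.map (fun x => x ++ o)),
       count + (if (lookupOf dicts s).isSome then 1 else 0)) := by
  unfold funcStep choiceOf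
  cases h : lookupOf dicts s with
  | some v =>
      simp [PySem.List.foldl_append_eq_flatMap, List.flatMap, Function.comp_def]
  | none => simp

-- A's whole fold, both components at once
theorem funcFold_eq (dicts : List (String × String)) :
    ∀ (ls : List Char) (res : List (List Char)) (count : Int),
      ls.foldl (funcStep dicts) (res, count) =
        (ls.foldl (fun r s => (choiceOf dicts s).flatMap (fun o => r.map (fun x => x ++ o))) res,
         count + countOf dicts ls)
  | [], res, count => by simp [countOf]
  | s :: ls, res, count => by
      rw [List.foldl_cons, funcStep_eq, funcFold_eq dicts ls, List.foldl_cons, countOf_cons]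
      ring_nf

-- B's recursion, one step, written uniformly through choiceOf
theorem altExpand_cons (dicts : List (String × String)) (s : Char) (ls : List Char) :
    altExpand dicts (s :: ls) =
      (altExpand dicts ls).flatMap (fun t => (choiceOf dicts s).map (fun o => o ++ t)) := by
  unfold choiceOf
  cases h : lookupOf dicts s with
  | some v => simp [altExpand, h, List.map_map, Function.comp_def]
  | none => simp [altExpand, h, ← List.flatMap_def, ← List.map_eq_flatMap]

-- A's left-to-right rebuild equals B's right-to-left expansion, seeded suffixes
theorem foldRes_eq_expand (dicts : List (String × String)) :
    ∀ (ls : List Char) (res : List (List Char)),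
      ls.foldl (fun r s => (choiceOf dicts s).flatMap (fun o => r.map (fun x => x ++ o))) res =
        (altExpand dicts ls).flatMap (fun t => res.map (fun x => x ++ t))
  | [], res => by simp [altExpand]
  | s :: ls, res => by
      rw [List.foldl_cons, foldRes_eq_expand dicts ls, altExpand_cons]
      simp [List.flatMap_assoc, List.flatMap_map, List.map_flatMap, Function.comp_def,
            List.append_assoc]

-- count == 0 exactly when no character of the string is a dict key
theorem countOf_eq_zero_iff (dicts : List (String × String)) (ls : List Char) :
    countOf dicts ls = 0 ↔
      ls.any (fun s => (lookupOf dicts s).isSome) = false := by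
  simp [countOf, List.countP_eq_zero, List.any_eq_false]

theorem func_spec : Claim_equal_func := by
  intro strs dicts _
  unfold Spec_func func func_alt
  rw [funcFold_eq, foldRes_eq_expand]
  by_cases h : strs.toList.any (fun s => (lookupOf dicts s).isSome) = true
  · have : ¬ (0 + countOf dicts strs.toList = 0) := by
      intro h0; rw [zero_add, countOf_eq_zero_iff] at h0; simp [h0] at h
    rw [if_neg this, if_pos h]
    simp
  · have h0 : 0 + countOf dicts strs.toList = 0 := by
      rw [zero_add, countOf_eq_zero_iff]; simpa using h
    rw [if_pos h0, if_neg h]
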